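-- pv_equiv track=rewrite | github.com/Vasily-Konovalov-Home/Dasha_diplom | server.py | term_in_sites
-- ===== SOURCE A (Python) =====
-- def term_in_sites(term: str, sites: str) -> bool:
--     """
--     Проверяет, содержится ли заданный поисковый запрос (полный URL)
--     в списке сайтов организации. Используется для точного сопоставления
--     URL-адресов социальных сетей и иных ресурсов, где важен полный путь.
--
--     Параметры:
--         term (str): поисковый запрос (URL без протокола).
--         sites (str): строка с сайтами организации.
--
--     Возвращает:
--         bool: True, если найдено точное совпадение полного URL, иначе False.
--     """
--     if not sites or not term:
--         return False
--
--     sites_lower = sites.lower()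
--     sites_clean = sites_lower.replace(";", ",").replace(" ", ",")
--     site_list = [s.strip() for s in sites_clean.split(",") if s.strip()]
--
--     for site in site_list:
--         site_clean = site
--         if "://" in site_clean:
--             site_clean = site_clean.split("://")[1]
--         if site_clean.startswith("www."):
--             site_clean = site_clean[4:]
--
--         # Точное совпадение полного URL (включая путь)
--         if site_clean == term.lower():
--             return True
--
--         # Дополнительная проверка: сравнение без протокола
--         term_clean = term.lower()
--         if term_clean.startswith("https://"):
--             term_clean = term_clean[8:]
--         elif term_clean.startswith("http://"):
--             term_clean = term_clean[7:]
--
--         if site_clean == term_clean: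
--             return True
--
--     return False
-- ===== SOURCE B (Python) =====
-- def term_in_sites(term: str, sites: str) -> bool:
--     if not sites or not term:
--         return False
--
--     # normalize the term once, up front
--     t = term.lower()
--     if t.startswith("https://"):
--         t_clean = t[8:]
--     elif t.startswith("http://"):
--         t_clean = t[7:]
--     else:
--         t_clean = t
--
--     def hit(tok: str) -> bool:
--         tok = tok.strip()
--         if not tok:
--             return False
--         if "://" in tok:
--             tok = tok.split("://")[1]
--         if tok.startswith("www."):
--             tok = tok[4:]
--         return tok == t or tok == t_clean
--
--     # single streaming pass over the characters of `sites`: tokens are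
--     # checked as soon as a delimiter ends them, with early exit on a hit
--     cur = []
--     for ch in sites:
--         c = ch.lower()
--         if c in ",; ":
--             if hit("".join(cur)):
--                 return True
--             cur = []
--         else:
--             cur.append(c)
--     return hit("".join(cur))
-- ===== Notes on version B (the rewrite author's own statement) =====
-- stated objective: alternative
-- what changed: A's staged pipeline (lowercase the whole sites string, two global replace passes, split on commas, strip each piece into a list, then a compare loop that renormalizes the term on every iteration) is replaced by normalizing the term once and a single streaming character scan over sites that builds each token in an accumulator and tests it the moment a delimiter ends it, with early exit.
import Mathlib
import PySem

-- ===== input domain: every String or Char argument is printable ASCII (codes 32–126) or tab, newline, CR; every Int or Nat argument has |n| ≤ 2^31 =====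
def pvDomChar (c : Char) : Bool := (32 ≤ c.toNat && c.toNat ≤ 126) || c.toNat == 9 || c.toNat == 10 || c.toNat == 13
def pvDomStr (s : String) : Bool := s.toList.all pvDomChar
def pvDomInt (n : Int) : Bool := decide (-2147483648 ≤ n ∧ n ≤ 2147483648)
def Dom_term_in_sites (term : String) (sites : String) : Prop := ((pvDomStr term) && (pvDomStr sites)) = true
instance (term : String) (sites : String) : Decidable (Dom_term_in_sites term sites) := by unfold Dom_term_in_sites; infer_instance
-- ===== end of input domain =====

-- B replaces A's staged pipeline (lowercase whole string, two global replaces, split, strip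
-- into a list, then a compare loop that renormalizes the term every iteration) by normalizing
-- the term once and a single streaming character scan over `sites` that tests each token as
-- soon as a delimiter ends it; objective: alternative (one fused pass instead of staged passes).

-- ===== PORT A =====
-- A's loop: for each site, normalize it, compare with term.lower(), then with the
-- protocol-stripped term; early return on a hit.
def pvLoopA (term : String) : List (List Char) → Bool
  | [] => false
  | site :: rest =>
      let siteClean := if PySem.Chars.isIn "://".toList site
        then ((PySem.Chars.split? site "://".toList).getD []).getD 1 []
        else site
      let siteClean := if PySem.Chars.startswith siteClean "www.".toList
        then PySem.List.slice siteClean (some 4) none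
        else siteClean
      if siteClean = PySem.Chars.lower term.toList then true
      else
        let termClean := PySem.Chars.lower term.toList
        let termClean := if PySem.Chars.startswith termClean "https://".toList
          then PySem.List.slice termClean (some 8) none
          else if PySem.Chars.startswith termClean "http://".toList
            then PySem.List.slice termClean (some 7) none
            else termClean
        if siteClean = termClean then true else pvLoopA term rest

def term_in_sites (term : String) (sites : String) : Bool :=
  if sites.toList = [] ∨ term.toList = [] then false
  else
    let sitesLower := PySem.Chars.lower sites.toList
    let sitesClean := PySem.Chars.replace (PySem.Chars.replace sitesLower ";".toList ",".toList) " ".toList ",".toList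
    let siteList := (((PySem.Chars.split? sitesClean ",".toList).getD []).map PySem.Chars.strip).filter (fun s => s ≠ [])
    pvLoopA term siteList

-- ===== PORT B =====
-- B's helper hit(tok): strip, reject empty, drop protocol and leading 'www.', compare with
-- the two precomputed targets.
def pvHit (t tClean tok : List Char) : Bool :=
  let s := PySem.Chars.strip tok
  if s = [] then false
  else
    let s := if PySem.Chars.isIn "://".toList s
      then ((PySem.Chars.split? s "://".toList).getD []).getD 1 []
      else s
    let s := if PySem.Chars.startswith s "www.".toList
      then PySem.List.slice s (some 4) none
      else s
    s = t || s = tClean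

-- B's for-loop over the characters of `sites`, with the token accumulator `cur`
-- (kept reversed, '"".join(cur)' = cur.reverse) and early return on a hit.
def pvScanB (t tClean : List Char) : List Char → List Char → Bool
  | [], cur => pvHit t tClean cur.reverse
  | ch :: rest, cur =>
      let c := PySem.Chars.lowerChar ch
      if c = ',' ∨ c = ';' ∨ c = ' ' then
        if pvHit t tClean cur.reverse then true else pvScanB t tClean rest []
      else pvScanB t tClean rest (c :: cur)

def term_in_sites_alt (term : String) (sites : String) : Bool :=
  if sites.toList = [] ∨ term.toList = [] then false
  else
    let t := PySem.Chars.lower term.toList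
    let tClean := if PySem.Chars.startswith t "https://".toList
      then PySem.List.slice t (some 8) none
      else if PySem.Chars.startswith t "http://".toList
        then PySem.List.slice t (some 7) none
        else t
    pvScanB t tClean sites.toList []

-- ===== PRECONDITION & SPEC =====
def Spec_term_in_sites (term : String) (sites : String) (out : Bool) : Prop := out = term_in_sites_alt term sites
instance (term : String) (sites : String) (out : Bool) : Decidable (Spec_term_in_sites term sites out) := by unfold Spec_term_in_sites; infer_instance

-- ===== CLAIM (what is proved, stated in full; the proofs are below) =====
def Claim_equal_term_in_sites : Prop := ∀ (term : String) (sites : String), Dom_term_in_sites term sites → Spec_term_in_sites term sites (term_in_sites term sites)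

-- ===== LEMMAS AND PROOFS =====

-- proof-only: A's per-char effect of lower + replace(';'→',') + replace(' '→',')
def pvG (c : Char) : Char :=
  let d := PySem.Chars.lowerChar c
  let d := if d = ';' then ',' else d
  if d = ' ' then ',' else d

-- proof-only: A's site normalization (drop protocol, drop leading 'www.')
def pvNorm (site : List Char) : List Char :=
  let s := if PySem.Chars.isIn "://".toList site
    then ((PySem.Chars.split? site "://".toList).getD []).getD 1 []
    else site
  if PySem.Chars.startswith s "www.".toList then PySem.List.slice s (some 4) none else s

-- proof-only: the protocol-stripped lowered term
def pvTClean (term : String) : List Char :=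
  if PySem.Chars.startswith (PySem.Chars.lower term.toList) "https://".toList then PySem.List.slice (PySem.Chars.lower term.toList) (some 8) none
  else if PySem.Chars.startswith (PySem.Chars.lower term.toList) "http://".toList then PySem.List.slice (PySem.Chars.lower term.toList) (some 7) none
  else PySem.Chars.lower term.toList

-- proof-only reference splitter on ','
def pvSplit : List Char → List (List Char)
  | [] => [[]]
  | c :: l => if c = ',' then [] :: pvSplit l else (pvSplit l).modifyHead (c :: ·)

theorem pvModifyHead_id {α : Type} (l : List α) : List.modifyHead (fun x => x) l = l := by
  cases l <;> rfl

theorem pvReplace_single (a b : Char) :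
    ∀ (l : List Char) (fuel : Nat), l.length ≤ fuel → ∀ (acc : List Char),
      PySem.Chars.replace.go [a] [b] fuel l acc
        = acc.reverse ++ l.map (fun c => if c = a then b else c) := by
  intro l
  induction l with
  | nil =>
      intro fuel _ acc
      cases fuel <;> simp [PySem.Chars.replace.go]
  | cons c t ih =>
      intro fuel hf acc
      cases fuel with
      | zero => simp at hf
      | succ f =>
        rw [PySem.Chars.replace.go]
        by_cases hc : c = a
        · simp [hc, List.isPrefixOf, ih f (by simpa using hf) (b :: acc)]
        · simp [List.isPrefixOf, hc, Ne.symm hc, ih f (by simpa using hf) (c :: acc)]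

theorem pvReplace_single' (a b : Char) (s : List Char) :
    PySem.Chars.replace s [a] [b] = s.map (fun c => if c = a then b else c) := by
  rw [PySem.Chars.replace]
  simp [pvReplace_single a b s s.length le_rfl []]

theorem pvSplitOn_go (l : List Char) : ∀ (fuel : Nat), l.length ≤ fuel →
    ∀ (cur : List Char) (acc : List (List Char)),
      PySem.Chars.splitOn.go [','] fuel l cur acc
        = acc.reverse ++ (pvSplit l).modifyHead (cur.reverse ++ ·) := by
  induction l with
  | nil =>
      intro fuel _ cur acc
      cases fuel <;> simp [PySem.Chars.splitOn.go, pvSplit]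
  | cons c t ih =>
      intro fuel hf cur acc
      cases fuel with
      | zero => simp at hf
      | succ f =>
        rw [PySem.Chars.splitOn.go]
        by_cases hc : c = ','
        · simp [hc, List.isPrefixOf, ih f (by simpa using hf) [] (cur.reverse :: acc), pvSplit,
            pvModifyHead_id]
        · simp only [List.isPrefixOf, hc, Ne.symm hc, beq_iff_eq, if_false, Bool.and_true,
            ih f (by simpa using hf) (c :: cur) acc, pvSplit,
            List.modifyHead_modifyHead, List.reverse_cons]
          congr 2
          funext x
          simp

theorem pvSplitOn_eq (s : List Char) : PySem.Chars.splitOn s [','] = pvSplit s := by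
  rw [PySem.Chars.splitOn, pvSplitOn_go s (s.length + 1) (by omega) [] []]
  simp [pvModifyHead_id]

theorem pvSplit_append (p : List Char) (hp : ∀ c ∈ p, c ≠ ',') (l : List Char) :
    pvSplit (p ++ l) = (pvSplit l).modifyHead (p ++ ·) := by
  induction p with
  | nil => simp [pvModifyHead_id]
  | cons c q ih =>
      have hc : c ≠ ',' := hp c (by simp)
      simp only [List.cons_append, pvSplit, if_neg hc,
        ih (fun x hx => hp x (by simp [hx])), List.modifyHead_modifyHead]
      congr 2

theorem pvLoopA_cons (term : String) (site : List Char) (rest : List (List Char)) :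
    pvLoopA term (site :: rest) =
      if pvNorm site = PySem.Chars.lower term.toList then true
      else if pvNorm site = pvTClean term then true
      else pvLoopA term rest := rfl

-- A's loop is an 'any' over the site list
theorem pvLoopA_eq_any (term : String) (L : List (List Char)) :
    pvLoopA term L =
      L.any (fun s => pvNorm s = PySem.Chars.lower term.toList || pvNorm s = pvTClean term) := by
  induction L with
  | nil => rfl
  | cons site rest ih =>
      rw [pvLoopA_cons, List.any_cons, ih]
      split_ifs with h1 h2 <;> simp [*]

theorem pvHit_eq (t tc tok : List Char) :
    pvHit t tc tok
      = (decide (PySem.Chars.strip tok ≠ []) &&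
          (pvNorm (PySem.Chars.strip tok) = t || pvNorm (PySem.Chars.strip tok) = tc)) := by
  unfold pvHit pvNorm
  by_cases h : PySem.Chars.strip tok = []
  · simp [h]
  · simp [h]

-- B's scan over the raw characters equals 'any hit' over A's comma-split tokens
theorem pvScan_eq (t tc : List Char) :
    ∀ (s : List Char) (cur : List Char), (∀ c ∈ cur, c ≠ ',') →
      pvScanB t tc s cur = (pvSplit (cur.reverse ++ s.map pvG)).any (pvHit t tc) := by
  intro s
  induction s with
  | nil =>
      intro cur hcur
      have hrev : ∀ c ∈ cur.reverse, c ≠ ',' := by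
        intro c hc; exact hcur c (List.mem_reverse.mp hc)
      have h1 : pvSplit cur.reverse = [cur.reverse] := by
        simpa [pvSplit] using pvSplit_append cur.reverse hrev []
      simp [pvScanB, h1]
  | cons ch rest ih =>
      intro cur hcur
      have hrev : ∀ c ∈ cur.reverse, c ≠ ',' := by
        intro c hc; exact hcur c (List.mem_reverse.mp hc)
      by_cases hd : PySem.Chars.lowerChar ch = ',' ∨ PySem.Chars.lowerChar ch = ';' ∨
          PySem.Chars.lowerChar ch = ' '
      · have hg : pvG ch = ',' := by
          unfold pvG
          rcases hd with h | h | h <;> simp [h]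
        simp only [pvScanB, if_pos hd, List.map_cons, hg,
          pvSplit_append cur.reverse hrev, pvSplit,
          ih [] (by simp)]
        split_ifs with hhit <;> simp [hhit]
      · have hne : PySem.Chars.lowerChar ch ≠ ',' := fun h => hd (Or.inl h)
        have hg : pvG ch = PySem.Chars.lowerChar ch := by
          unfold pvG
          have h2 : PySem.Chars.lowerChar ch ≠ ';' := fun h => hd (Or.inr (Or.inl h))
          have h3 : PySem.Chars.lowerChar ch ≠ ' ' := fun h => hd (Or.inr (Or.inr h))
          simp [h2, h3]
        have hcur' : ∀ c ∈ (PySem.Chars.lowerChar ch :: cur), c ≠ ',' := by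
          intro c hc
          rcases List.mem_cons.mp hc with h | h
          · exact h ▸ hne
          · exact hcur c h
        rw [pvScanB, if_neg hd, ih (PySem.Chars.lowerChar ch :: cur) hcur']
        simp [hg]

theorem pvAny_filter_map (M : List (List Char)) (q : List Char → Bool) :
    ((M.map PySem.Chars.strip).filter (fun s => s ≠ [])).any q
      = M.any (fun tok => decide (PySem.Chars.strip tok ≠ []) && q (PySem.Chars.strip tok)) := by
  simp [Function.comp_def]

theorem pvMain (term sites : String) :
    term_in_sites term sites = term_in_sites_alt term sites := by
  by_cases h : sites.toList = [] ∨ term.toList = []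
  · rw [term_in_sites, term_in_sites_alt, if_pos h, if_pos h]
  · have hclean : PySem.Chars.replace
        (PySem.Chars.replace (PySem.Chars.lower sites.toList) ";".toList ",".toList)
        " ".toList ",".toList = sites.toList.map pvG := by
      rw [show ";".toList = [';'] from rfl, show " ".toList = [' '] from rfl,
        show ",".toList = [','] from rfl, pvReplace_single', pvReplace_single',
        PySem.Chars.lower, List.map_map, List.map_map]
      rfl
    simp only [term_in_sites, term_in_sites_alt, if_neg h]
    rw [hclean, show ",".toList = [','] from rfl, PySem.Chars.split?]
    simp only [List.isEmpty_cons, Bool.false_eq_true, if_false, Option.getD_some, pvSplitOn_eq]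
    rw [pvLoopA_eq_any, pvAny_filter_map]
    have hscan := pvScan_eq (PySem.Chars.lower term.toList) (pvTClean term)
      sites.toList [] (by simp)
    simp only [List.reverse_nil, List.nil_append] at hscan
    rw [show (pvScanB (PySem.Chars.lower term.toList)
        (if PySem.Chars.startswith (PySem.Chars.lower term.toList) "https://".toList
          then PySem.List.slice (PySem.Chars.lower term.toList) (some 8) none
          else if PySem.Chars.startswith (PySem.Chars.lower term.toList) "http://".toList
            then PySem.List.slice (PySem.Chars.lower term.toList) (some 7) none
            else PySem.Chars.lower term.toList) sites.toList [])
        = pvScanB (PySem.Chars.lower term.toList) (pvTClean term) sites.toList [] from rfl]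
    rw [hscan]
    congr 1
    funext tok
    rw [pvHit_eq]

-- ===== VERDICT (by name: the statement is the Claim_ definition above) =====
theorem term_in_sites_spec : Claim_equal_term_in_sites := by
  intro term sites _
  exact pvMain term sites
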